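-- pv_equiv track=rewrite | github.com/jasonfghx/lilicoco | A star/decision.py | process_list_with_mapping
-- ===== SOURCE A (Python) =====
-- def process_list_with_mapping(data: list) -> list:
--     sorted_lst = sorted(data)
--
--     mapping = {}
--     for i, val in enumerate(sorted_lst):
--         if val not in mapping:
--             mapping[val] = i+1
--
--     new_lst = [mapping[val] for val in data]
--     new_lst = [int(val) for val in new_lst]
--
--     return new_lst
-- ===== SOURCE B (Python) =====
-- def process_list_with_mapping(data: list) -> list:
--     # rank = 1 + number of strictly smaller elements (no sort, no dict)
--     return [1 + sum(1 for x in data if x < val) for val in data]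
-- ===== Notes on version B (the rewrite author's own statement) =====
-- stated objective: simpler
-- what changed: Replaces sort + first-occurrence mapping dict with a direct one-liner: each element's rank is 1 plus the count of strictly smaller elements.
import Mathlib
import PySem

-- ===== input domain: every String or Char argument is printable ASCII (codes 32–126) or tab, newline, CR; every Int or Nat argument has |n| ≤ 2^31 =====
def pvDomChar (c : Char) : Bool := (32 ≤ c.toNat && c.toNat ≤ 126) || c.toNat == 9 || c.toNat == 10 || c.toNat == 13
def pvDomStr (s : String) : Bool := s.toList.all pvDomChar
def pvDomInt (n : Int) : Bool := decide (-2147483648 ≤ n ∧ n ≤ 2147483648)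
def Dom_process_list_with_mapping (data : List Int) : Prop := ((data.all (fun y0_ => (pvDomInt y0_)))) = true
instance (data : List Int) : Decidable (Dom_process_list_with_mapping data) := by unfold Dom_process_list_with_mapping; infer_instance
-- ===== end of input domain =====

-- B replaces sort + first-occurrence dict by a direct count of strictly smaller elements (simpler).

-- ===== PORT A =====
-- sorted_lst = sorted(data); for i, val in enumerate(sorted_lst): if val not in mapping: mapping[val] = i+1;
-- new_lst = [mapping[val] for val in data]  (mapping[val] never misses: val ∈ data, a permutation of sorted_lst,
-- so we read it with getD 0 — the default is never used); int(val) is the identity on ints.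
def process_list_with_mapping (data : List Int) : List Int :=
  let sorted_lst := PySem.List.sorted data (fun x => x) false
  let mapping := (PySem.List.enumerate sorted_lst 0).foldl
      (fun m p => if m.contains p.2 then m else m.insert p.2 (p.1 + 1)) PySem.Dict.empty
  let new_lst := data.map (fun val => mapping.getD val 0)
  let new_lst := new_lst.map (fun val => val)
  new_lst

-- ===== PORT B =====
-- [1 + sum(1 for x in data if x < val) for val in data]
def process_list_with_mapping_alt (data : List Int) : List Int :=
  data.map (fun val => 1 + ((data.countP (fun x => decide (x < val))) : Int))

-- ===== PRECONDITION & SPEC =====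
def Spec_process_list_with_mapping (data : List Int) (out : List Int) : Prop := out = process_list_with_mapping_alt data
instance (data : List Int) (out : List Int) : Decidable (Spec_process_list_with_mapping data out) := by unfold Spec_process_list_with_mapping; infer_instance

-- ===== CLAIM (what is proved, stated in full; the proofs are below) =====
def Claim_equal_process_list_with_mapping : Prop := ∀ (data : List Int), Dom_process_list_with_mapping data → Spec_process_list_with_mapping data (process_list_with_mapping data)

-- ===== LEMMAS AND PROOFS =====

-- The A-side loop, with an arbitrary start index and accumulator dict (the port uses i = 0, empty).
def pvLoopD (s : List Int) (i : Int) (d : PySem.Dict Int Int) : PySem.Dict Int Int :=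
  (PySem.List.enumerate s i).foldl
    (fun m p => if m.contains p.2 then m else m.insert p.2 (p.1 + 1)) d

-- After the loop, a key absent from d is mapped to (start index + first index of v in s + 1).
theorem pvLoopD_get? (s : List Int) (i : Int) (d : PySem.Dict Int Int) (v : Int) :
    (pvLoopD s i d).get? v =
      if d.contains v then d.get? v else (s.idxOf? v).map (fun k => i + k + 1) := by
  induction s generalizing i d with
  | nil =>
    simp only [pvLoopD, PySem.List.enumerate_nil, List.foldl_nil, List.idxOf?_nil]
    split_ifs with h
    · rfl
    · have hn : d.get? v = none := by
        rw [PySem.Dict.get?_eq_none_iff_contains]; simp [h]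
      simp [hn]
  | cons x t ih =>
    have hstep : pvLoopD (x :: t) i d
        = pvLoopD t (i + 1) (if d.contains x then d else d.insert x (i + 1)) := by
      simp [pvLoopD, PySem.List.enumerate_cons]
    have hid : v ≠ x → (x :: t).idxOf? v = (t.idxOf? v).map (· + 1) := by
      intro hvx
      have : (x == v) = false := by simp; exact fun h => hvx h.symm
      simp [List.idxOf?_cons, this]
    by_cases hc : d.contains x = true
    · rw [if_pos hc] at hstep
      rw [hstep, ih]
      by_cases hvx : v = x
      · subst hvx; simp [hc]
      · rw [hid hvx]
        split_ifs with h
        · rfl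
        · cases htv : t.idxOf? v with
          | none => rfl
          | some k => simp; push_cast; ring
    · rw [if_neg hc] at hstep
      rw [hstep, ih]
      by_cases hvx : v = x
      · subst hvx
        rw [if_pos (PySem.Dict.contains_insert_self d v (i + 1))]
        rw [PySem.Dict.get?_insert_self]
        have : d.contains v = false := by simp [hc]
        simp [this, List.idxOf?_cons]
      · have hcv : (d.insert x (i + 1)).contains v = d.contains v := by
          rw [PySem.Dict.contains_insert]
          simp [hvx]
        rw [hcv, PySem.Dict.get?_insert_of_ne d (i + 1) hvx, hid hvx]
        split_ifs with h
        · rfl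
        · cases htv : t.idxOf? v with
          | none => rfl
          | some k => simp; push_cast; ring

-- In a ≤-sorted list containing v, the first index of v is the number of elements < v.
theorem pvIdxOf_sorted (s : List Int) (hs : s.Pairwise (· ≤ ·)) (v : Int) (hv : v ∈ s) :
    s.idxOf? v = some (s.countP (fun x => decide (x < v))) := by
  induction s with
  | nil => cases hv
  | cons a t ih =>
    rw [List.pairwise_cons] at hs
    by_cases hva : v = a
    · subst hva
      have h0 : t.countP (fun x => decide (x < v)) = 0 := by
        rw [List.countP_eq_zero]
        intro x hx
        simp [not_lt.mpr (hs.1 x hx)]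
      simp [List.idxOf?_cons, h0]
    · have hvt : v ∈ t := by cases hv with
        | head => exact absurd rfl hva
        | tail _ h => exact h
      have hav : a < v := lt_of_le_of_ne (hs.1 v hvt) (fun h => hva h.symm)
      rw [List.idxOf?_cons]
      have : (a == v) = false := by simp; exact fun h => hva h.symm
      simp only [this, ih hs.2 hvt, Option.map_some, List.countP_cons]
      simp [hav, Nat.add_comm]

theorem process_list_with_mapping_eq (data : List Int) :
    process_list_with_mapping data = process_list_with_mapping_alt data := by
  unfold process_list_with_mapping process_list_with_mapping_alt
  simp only [List.map_map]
  apply List.map_congr_left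
  intro v hv
  have hperm := PySem.List.sorted_perm data (fun x => x) false
  have hvmem : v ∈ PySem.List.sorted data (fun x => x) false :=
    (PySem.List.mem_sorted _ _ _ _).mpr hv
  have hpw : (PySem.List.sorted data (fun x => x) false).Pairwise (· ≤ ·) :=
    PySem.List.sorted_pairwise data (fun x => x)
  have hget := pvLoopD_get? (PySem.List.sorted data (fun x => x) false) 0 PySem.Dict.empty v
  rw [pvIdxOf_sorted _ hpw v hvmem] at hget
  have hcnt : (PySem.List.sorted data (fun x => x) false).countP (fun x => decide (x < v))
      = data.countP (fun x => decide (x < v)) := hperm.countP_eq _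
  simp only [PySem.Dict.contains_empty] at hget
  show ((pvLoopD (PySem.List.sorted data (fun x => x) false) 0 PySem.Dict.empty).getD v 0 : Int) = _
  rw [PySem.Dict.getD_eq_get?_getD, hget, hcnt]
  simp [Int.add_comm]

-- ===== VERDICT (by name: the statement is the Claim_ definition above) =====
theorem process_list_with_mapping_spec : Claim_equal_process_list_with_mapping := by
  intro data _
  exact process_list_with_mapping_eq data
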